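-- pv_equiv track=rewrite | github.com/Jinish2170/elliotAI | veritas/agents/vision.py | _find_temporal_pair
-- ===== SOURCE A (Python) =====
-- from typing import Optional
--
-- def _find_temporal_pair(
--     screenshots: list[str], labels: list[str]
-- ) -> tuple[Optional[str], Optional[str]]:
--     """Find the t0 and t+delay screenshot pair."""
--     t0_path = None
--     t_delay_path = None
--
--     for path, label in zip(screenshots, labels):
--         if label == "t0":
--             t0_path = path
--         elif label.startswith("t") and label != "t0":
--             t_delay_path = path
--
--     return t0_path, t_delay_path
-- ===== SOURCE B (Python) =====
-- def _find_temporal_pair(screenshots, labels):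
--     """Find the t0 and t+delay screenshot pair (backward scan, first match wins)."""
--     t0_path = None
--     t_delay_path = None
--     for path, label in reversed(list(zip(screenshots, labels))):
--         if t0_path is None and label == "t0":
--             t0_path = path
--         elif t_delay_path is None and label.startswith("t") and label != "t0":
--             t_delay_path = path
--         if t0_path is not None and t_delay_path is not None:
--             break
--     return t0_path, t_delay_path
-- ===== Notes on version B (the rewrite author's own statement) =====
-- stated objective: alternative
-- what changed: Replaces A's forward overwrite-on-every-match scan with a backward scan that keeps the first match per category and breaks as soon as both paths are found.
import Mathlib
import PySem

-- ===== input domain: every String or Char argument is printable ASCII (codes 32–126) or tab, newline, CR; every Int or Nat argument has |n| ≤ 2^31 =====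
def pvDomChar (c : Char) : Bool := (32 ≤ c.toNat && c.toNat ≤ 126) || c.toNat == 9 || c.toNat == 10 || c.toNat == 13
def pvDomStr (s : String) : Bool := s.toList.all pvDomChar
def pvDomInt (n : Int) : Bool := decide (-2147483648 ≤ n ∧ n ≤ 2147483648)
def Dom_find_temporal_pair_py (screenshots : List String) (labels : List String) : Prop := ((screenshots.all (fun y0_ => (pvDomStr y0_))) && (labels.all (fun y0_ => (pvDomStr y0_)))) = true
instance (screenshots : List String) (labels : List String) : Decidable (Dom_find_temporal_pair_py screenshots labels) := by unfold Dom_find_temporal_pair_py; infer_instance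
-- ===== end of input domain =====

-- B replaces A's forward overwrite-on-every-match scan by a backward scan keeping the
-- first match per category with early exit once both are found (alternative decomposition).


-- ===== PORT A =====
-- one loop step of A: overwrite the matching slot
def pvStepA (st : Option String × Option String) (pl : String × String) : Option String × Option String :=
  if pl.2 = "t0" then (some pl.1, st.2)
  else if PySem.Str.startswith pl.2 "t" = true ∧ pl.2 ≠ "t0" then (st.1, some pl.1)
  else st

def find_temporal_pair_py (screenshots : List String) (labels : List String) : Option String × Option String :=
  (screenshots.zip labels).foldl pvStepA (none, none)

-- ===== PORT B =====
-- backward scan: first match per empty slot, break when both found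
def pvGoB : List (String × String) → Option String → Option String → Option String × Option String
  | [], t0, td => (t0, td)
  | (p, l) :: rest, t0, td =>
    let st :=
      if t0 = none ∧ l = "t0" then (some p, td)
      else if td = none ∧ PySem.Str.startswith l "t" = true ∧ l ≠ "t0" then (t0, some p)
      else (t0, td)
    if st.1 ≠ none ∧ st.2 ≠ none then st else pvGoB rest st.1 st.2

def find_temporal_pair_py_alt (screenshots : List String) (labels : List String) : Option String × Option String :=
  pvGoB (screenshots.zip labels).reverse none none

-- ===== PRECONDITION & SPEC =====
def Spec_find_temporal_pair_py (screenshots : List String) (labels : List String) (out : Option String × Option String) : Prop := out = find_temporal_pair_py_alt screenshots labels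
instance (screenshots : List String) (labels : List String) (out : Option String × Option String) : Decidable (Spec_find_temporal_pair_py screenshots labels out) := by unfold Spec_find_temporal_pair_py; infer_instance

-- ===== CLAIM (what is proved, stated in full; the proofs are below) =====
def Claim_equal_find_temporal_pair_py : Prop := ∀ (screenshots : List String) (labels : List String), Dom_find_temporal_pair_py screenshots labels → Spec_find_temporal_pair_py screenshots labels (find_temporal_pair_py screenshots labels)

-- ===== LEMMAS AND PROOFS =====

-- first path whose label is "t0"
def pvF1 (l : List (String × String)) : Option String :=
  (l.find? (fun pl => pl.2 == "t0")).map Prod.fst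
-- first path whose label starts with "t" but is not "t0"
def pvF2 (l : List (String × String)) : Option String :=
  (l.find? (fun pl => PySem.Str.startswith pl.2 "t" && pl.2 != "t0")).map Prod.fst

theorem pvF1_nil : pvF1 [] = none := rfl
theorem pvF2_nil : pvF2 [] = none := rfl

theorem pvTL : "t".toList = ['t'] := rfl

theorem pvF1_cons (p l : String) (rest : List (String × String)) :
    pvF1 ((p, l) :: rest) = if l = "t0" then some p else pvF1 rest := by
  by_cases h : l = "t0"
  · simp [pvF1, List.find?, h]
  · have hb : (l == "t0") = false := beq_eq_false_iff_ne.mpr h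
    simp [pvF1, List.find?, h, hb]

theorem pvF2_cons (p l : String) (rest : List (String × String)) :
    pvF2 ((p, l) :: rest) =
      if PySem.Str.startswith l "t" = true ∧ l ≠ "t0" then some p else pvF2 rest := by
  simp only [pvF2, List.find?, PySem.Str.startswith, pvTL]
  by_cases h1 : PySem.Chars.startswith l.toList ['t'] = true
  · by_cases h2 : l = "t0"
    · simp [h1, h2]
    · have hb : (l != "t0") = true := bne_iff_ne.mpr h2
      simp [h1, h2, hb]
  · simp [Bool.not_eq_true] at h1
    simp [h1, pvF2]

theorem pvF1_append (l₁ l₂ : List (String × String)) :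
    pvF1 (l₁ ++ l₂) = (pvF1 l₁).orElse (fun _ => pvF1 l₂) := by
  simp only [pvF1, List.find?_append]
  cases List.find? (fun pl => pl.2 == "t0") l₁ <;> simp

theorem pvF2_append (l₁ l₂ : List (String × String)) :
    pvF2 (l₁ ++ l₂) = (pvF2 l₁).orElse (fun _ => pvF2 l₂) := by
  simp only [pvF2, List.find?_append]
  cases List.find? (fun pl => PySem.Str.startswith pl.2 "t" && pl.2 != "t0") l₁ <;> simp

-- characterisation of A's loop: final slot = last match in l, else the initial value
theorem foldl_stepA (l : List (String × String)) (t0 td : Option String) :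
    l.foldl pvStepA (t0, td) =
      ((pvF1 l.reverse).orElse (fun _ => t0), (pvF2 l.reverse).orElse (fun _ => td)) := by
  induction l generalizing t0 td with
  | nil => simp [pvF1_nil, pvF2_nil]
  | cons x rest ih =>
    obtain ⟨p, lab⟩ := x
    have hrev : ((p, lab) :: rest).reverse = rest.reverse ++ [(p, lab)] := by simp
    rw [List.foldl_cons, ih, hrev, pvF1_append, pvF2_append]
    by_cases h1 : lab = "t0"
    · simp [pvStepA, h1, pvF1_cons, pvF2_cons, pvF2_nil]
    · by_cases h2 : PySem.Str.startswith lab "t" = true ∧ lab ≠ "t0"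
      · simp [pvStepA, PySem.Str.startswith, h1, pvF1_cons, pvF2_cons, pvF1_nil, pvF2_nil] at *
        simp_all
      · simp [pvStepA, PySem.Str.startswith, h1, pvF1_cons, pvF2_cons, pvF1_nil, pvF2_nil] at *
        simp_all

-- characterisation of B's loop: slot = initial value if set, else first match in l
theorem pvGoB_char (l : List (String × String)) (t0 td : Option String) :
    pvGoB l t0 td =
      (t0.orElse (fun _ => pvF1 l), td.orElse (fun _ => pvF2 l)) := by
  induction l generalizing t0 td with
  | nil => simp [pvGoB, pvF1_nil, pvF2_nil]
  | cons x rest ih =>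
    obtain ⟨p, lab⟩ := x
    rw [pvGoB]
    by_cases hb1 : t0 = none ∧ lab = "t0"
    · simp only [hb1, and_self, if_pos]
      by_cases hd : td = none
      · simp [hd, ih, pvF1_cons, pvF2_cons, hb1.2]
      · obtain ⟨v, hv⟩ := Option.ne_none_iff_exists'.mp hd
        simp [hv, pvF1_cons, pvF2_cons, hb1.2]
    · rw [if_neg hb1]
      by_cases hb2 : td = none ∧ PySem.Str.startswith lab "t" = true ∧ lab ≠ "t0"
      · simp only [hb2]
        by_cases ht : t0 = none
        · simp only [PySem.Str.startswith, pvTL] at hb2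
          simp [ht, ih, pvF1_cons, pvF2_cons, PySem.Str.startswith, hb2.2.1, hb2.2.2]
        · obtain ⟨v, hv⟩ := Option.ne_none_iff_exists'.mp ht
          simp only [PySem.Str.startswith, pvTL] at hb2
          simp [hv, pvF1_cons, pvF2_cons, PySem.Str.startswith, hb2.2.1, hb2.2.2]
      · rw [if_neg hb2]
        simp only []
        by_cases hboth : t0 ≠ none ∧ td ≠ none
        · obtain ⟨v1, hv1⟩ := Option.ne_none_iff_exists'.mp hboth.1
          obtain ⟨v2, hv2⟩ := Option.ne_none_iff_exists'.mp hboth.2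
          simp [hv1, hv2]
        · rw [if_neg hboth, ih, pvF1_cons, pvF2_cons]
          congr 1
          · by_cases ht : t0 = none
            · have : ¬ lab = "t0" := fun h => hb1 ⟨ht, h⟩
              simp [ht, this]
            · obtain ⟨v, hv⟩ := Option.ne_none_iff_exists'.mp ht
              simp [hv]
          · by_cases hd : td = none
            · have h3 : ¬ (PySem.Str.startswith lab "t" = true ∧ lab ≠ "t0") :=
                fun h => hb2 ⟨hd, h⟩
              simp only [PySem.Str.startswith] at h3
              rcases Decidable.not_and_iff_not_or_not.mp h3 with h4 | h5
              · simp [Bool.not_eq_true] at h4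
                simp [hd, h4]
              · simp [hd, Decidable.not_not.mp h5]
            · obtain ⟨v, hv⟩ := Option.ne_none_iff_exists'.mp hd
              simp [hv]

-- ===== VERDICT (by name: the statement is the Claim_ definition above) =====
theorem find_temporal_pair_py_spec : Claim_equal_find_temporal_pair_py := by
  intro screenshots labels _
  unfold Spec_find_temporal_pair_py find_temporal_pair_py find_temporal_pair_py_alt
  rw [foldl_stepA, pvGoB_char]
  simp
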